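-- pv_equiv track=rewrite | github.com/agnel18/anki-fluent-forever-language-card-generator | languages/german/domain/de_validator.py | _group_noun_phrases
-- ===== SOURCE A (Python) =====
-- from typing import Dict, Any, List, Optional, Tuple
--
-- def _group_noun_phrases(words: List[Dict[str, Any]]) -> List[List[Dict[str, Any]]]:
--     """Group words into noun phrases for validation."""
--     phrases = []
--     current_phrase = []
--
--     for word in words:
--         role = word.get('grammatical_role')
--
--         if role in ['article', 'adjective', 'noun']:
--             current_phrase.append(word)
--
--             # If we hit a noun, this might end the phrase
--             if role == 'noun':
--                 phrases.append(current_phrase)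
--                 current_phrase = []
--         else:
--             # Non-noun-phrase word - save current phrase if exists
--             if current_phrase:
--                 phrases.append(current_phrase)
--                 current_phrase = []
--
--     # Add any remaining phrase
--     if current_phrase:
--         phrases.append(current_phrase)
--
--     return phrases
-- ===== SOURCE B (Python) =====
-- from itertools import groupby
-- from typing import Dict, Any, List
--
-- def _is_phrase_word(word: Dict[str, Any]) -> bool:
--     return word.get('grammatical_role') in ('article', 'adjective', 'noun')
--
-- def _group_noun_phrases(words: List[Dict[str, Any]]) -> List[List[Dict[str, Any]]]:
--     """Group words into noun phrases: two stages — partition into maximal runs of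
--     phrase-words via groupby, then split each kept run after every noun."""
--     phrases = []
--     for is_phrase, run in groupby(words, key=_is_phrase_word):
--         if not is_phrase:
--             continue
--         current = []
--         for word in run:
--             current.append(word)
--             if word.get('grammatical_role') == 'noun':
--                 phrases.append(current)
--                 current = []
--         if current:
--             phrases.append(current)
--     return phrases
-- ===== Notes on version B (the rewrite author's own statement) =====
-- stated objective: alternative
-- what changed: Replaced the single interleaved loop carrying phrase state across separator words by a two-stage pipeline: itertools.groupby first partitions the list into maximal runs of phrase-words (separator runs are discarded), then each run is split into phrases after every noun, flushing a trailing partial phrase.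
import Mathlib
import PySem

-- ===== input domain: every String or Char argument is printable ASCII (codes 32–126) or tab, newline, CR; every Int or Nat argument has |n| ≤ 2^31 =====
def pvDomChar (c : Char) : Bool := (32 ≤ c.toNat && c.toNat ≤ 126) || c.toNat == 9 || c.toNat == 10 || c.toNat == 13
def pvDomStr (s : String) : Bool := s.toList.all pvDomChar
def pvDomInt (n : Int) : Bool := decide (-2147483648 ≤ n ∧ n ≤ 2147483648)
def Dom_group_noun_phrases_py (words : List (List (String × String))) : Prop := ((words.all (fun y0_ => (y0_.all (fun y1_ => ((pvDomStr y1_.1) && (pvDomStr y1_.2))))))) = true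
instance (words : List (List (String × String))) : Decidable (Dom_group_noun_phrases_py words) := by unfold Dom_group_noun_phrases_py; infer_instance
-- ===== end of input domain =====

-- B replaces A's single interleaved loop by a two-stage pipeline (groupby into maximal
-- runs of phrase-words, then split each run after every noun); alternative decomposition, same cost.


-- ===== PORT A =====
-- word.get('grammatical_role'): first-match lookup in the association list
def pvRole (w : List (String × String)) : Option String :=
  (PySem.Dict.mk w).get? "grammatical_role"

def group_noun_phrases_py (words : List (List (String × String))) : List (List (List (String × String))) :=
  let st := words.foldl
    (fun (s : List (List (List (String × String))) × List (List (String × String))) w =>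
      let role := pvRole w
      if role = some "article" ∨ role = some "adjective" ∨ role = some "noun" then
        let cur := s.2 ++ [w]
        if role = some "noun" then (s.1 ++ [cur], []) else (s.1, cur)
      else
        if s.2 ≠ [] then (s.1 ++ [s.2], []) else s)
    ([], [])
  if st.2 ≠ [] then st.1 ++ [st.2] else st.1

-- ===== PORT B =====
def pvIsPhraseWord (w : List (String × String)) : Bool :=
  pvRole w = some "article" ∨ pvRole w = some "adjective" ∨ pvRole w = some "noun"

-- itertools.groupby with a Bool key: list of (key, maximal run with that key)
def pvGroupBy (key : List (String × String) → Bool) :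
    List (List (String × String)) → List (Bool × List (List (String × String)))
  | [] => []
  | x :: xs =>
    (key x, x :: xs.takeWhile (fun y => key y == key x)) ::
      pvGroupBy key (xs.dropWhile (fun y => key y == key x))
termination_by l => l.length
decreasing_by
  simp only [List.length_cons]
  exact Nat.lt_succ_of_le (List.length_dropWhile_le _ _)

-- split one run of phrase-words into phrases, cutting after every noun
def pvSplitRun (run : List (List (String × String))) : List (List (List (String × String))) :=
  let st := run.foldl
    (fun (s : List (List (List (String × String))) × List (List (String × String))) w =>
      let cur := s.2 ++ [w]
      if pvRole w = some "noun" then (s.1 ++ [cur], []) else (s.1, cur))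
    ([], [])
  if st.2 ≠ [] then st.1 ++ [st.2] else st.1

def group_noun_phrases_py_alt (words : List (List (String × String))) : List (List (List (String × String))) :=
  (pvGroupBy pvIsPhraseWord words).foldl
    (fun acc g => if g.1 then acc ++ pvSplitRun g.2 else acc) []

-- ===== PRECONDITION & SPEC =====
def Spec_group_noun_phrases_py (words : List (List (String × String))) (out : List (List (List (String × String)))) : Prop := out = group_noun_phrases_py_alt words
instance (words : List (List (String × String))) (out : List (List (List (String × String)))) : Decidable (Spec_group_noun_phrases_py words out) := by unfold Spec_group_noun_phrases_py; infer_instance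

-- ===== CLAIM (what is proved, stated in full; the proofs are below) =====
def Claim_equal_group_noun_phrases_py : Prop := ∀ (words : List (List (String × String))), Dom_group_noun_phrases_py words → Spec_group_noun_phrases_py words (group_noun_phrases_py words)

-- ===== LEMMAS AND PROOFS =====

-- named copies of the two loop bodies and the final flush (used only by the proofs)
def stepA (s : List (List (List (String × String))) × List (List (String × String)))
    (w : List (String × String)) :
    List (List (List (String × String))) × List (List (String × String)) :=
  if pvRole w = some "article" ∨ pvRole w = some "adjective" ∨ pvRole w = some "noun" then
    if pvRole w = some "noun" then (s.1 ++ [s.2 ++ [w]], []) else (s.1, s.2 ++ [w])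
  else
    if s.2 ≠ [] then (s.1 ++ [s.2], []) else s

def stepS (s : List (List (List (String × String))) × List (List (String × String)))
    (w : List (String × String)) :
    List (List (List (String × String))) × List (List (String × String)) :=
  if pvRole w = some "noun" then (s.1 ++ [s.2 ++ [w]], []) else (s.1, s.2 ++ [w])

def finishP (st : List (List (List (String × String))) × List (List (String × String))) :
    List (List (List (String × String))) :=
  if st.2 ≠ [] then st.1 ++ [st.2] else st.1

-- reference recursion for A: remaining phrases given current phrase `cur`
def goA (cur : List (List (String × String))) :
    List (List (String × String)) → List (List (List (String × String)))
  | [] => if cur ≠ [] then [cur] else []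
  | w :: ws =>
    if pvRole w = some "article" ∨ pvRole w = some "adjective" ∨ pvRole w = some "noun" then
      if pvRole w = some "noun" then (cur ++ [w]) :: goA [] ws else goA (cur ++ [w]) ws
    else
      if cur ≠ [] then cur :: goA [] ws else goA [] ws

-- reference recursion for pvSplitRun
def goS (cur : List (List (String × String))) :
    List (List (String × String)) → List (List (List (String × String)))
  | [] => if cur ≠ [] then [cur] else []
  | w :: ws =>
    if pvRole w = some "noun" then (cur ++ [w]) :: goS [] ws else goS (cur ++ [w]) ws

theorem goA_foldl (l : List (List (String × String)))
    (acc : List (List (List (String × String)))) (cur : List (List (String × String))) :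
    finishP (l.foldl stepA (acc, cur)) = acc ++ goA cur l := by
  induction l generalizing acc cur with
  | nil =>
    simp only [List.foldl_nil, finishP, goA]
    by_cases h : cur = [] <;> simp [h]
  | cons w ws ih =>
    simp only [List.foldl_cons, goA]
    by_cases h1 : pvRole w = some "article" ∨ pvRole w = some "adjective" ∨ pvRole w = some "noun"
    · by_cases h2 : pvRole w = some "noun"
      · simp only [stepA, if_pos h1, if_pos h2]
        rw [ih]; simp [List.append_assoc]
      · simp only [stepA, if_pos h1, if_neg h2]
        rw [ih]
    · by_cases hc : cur = []
      · simp only [stepA, if_neg h1, hc]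
        rw [if_neg (by simp), ih]
        simp
      · simp only [stepA, if_neg h1, if_pos hc]
        rw [ih]
        simp [List.append_assoc]

theorem group_noun_phrases_py_eq_goA (words : List (List (String × String))) :
    group_noun_phrases_py words = goA [] words := by
  have h : group_noun_phrases_py words = finishP (words.foldl stepA ([], [])) := rfl
  rw [h, goA_foldl]; simp

theorem goS_foldl (l : List (List (String × String)))
    (acc : List (List (List (String × String)))) (cur : List (List (String × String))) :
    finishP (l.foldl stepS (acc, cur)) = acc ++ goS cur l := by
  induction l generalizing acc cur with
  | nil =>
    simp only [List.foldl_nil, finishP, goS]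
    by_cases h : cur = [] <;> simp [h]
  | cons w ws ih =>
    simp only [List.foldl_cons, goS]
    by_cases h2 : pvRole w = some "noun"
    · simp only [stepS, if_pos h2]
      rw [ih]; simp [List.append_assoc]
    · simp only [stepS, if_neg h2]
      rw [ih]

theorem pvSplitRun_eq_goS (run : List (List (String × String))) :
    pvSplitRun run = goS [] run := by
  have h : pvSplitRun run = finishP (run.foldl stepS ([], [])) := rfl
  rw [h, goS_foldl]; simp

-- A skips a non-phrase prefix when its current phrase is empty
theorem goA_dropWhile_not (l : List (List (String × String))) :
    goA [] l = goA [] (l.dropWhile (fun y => pvIsPhraseWord y == false)) := by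
  induction l with
  | nil => rfl
  | cons w ws ih =>
    by_cases h : pvIsPhraseWord w
    · simp [h]
    · have h' : ¬ (pvRole w = some "article" ∨ pvRole w = some "adjective" ∨ pvRole w = some "noun") := by
        simpa [pvIsPhraseWord] using h
      simp only [List.dropWhile_cons]
      rw [if_pos (by simp [h])]
      rw [← ih]
      simp [goA, h']

-- A on a phrase-prefix splits into goS on the prefix plus goA on the rest
theorem goA_takeWhile (l : List (List (String × String))) (cur : List (List (String × String))) :
    goA cur l = goS cur (l.takeWhile (fun y => pvIsPhraseWord y == true)) ++
      goA [] (l.dropWhile (fun y => pvIsPhraseWord y == true)) := by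
  induction l generalizing cur with
  | nil =>
    simp only [List.takeWhile_nil, List.dropWhile_nil, goS, goA]
    by_cases h : cur = [] <;> simp [h]
  | cons w ws ih =>
    by_cases h : pvIsPhraseWord w
    · have h' : pvRole w = some "article" ∨ pvRole w = some "adjective" ∨ pvRole w = some "noun" := by
        simpa [pvIsPhraseWord] using h
      simp only [List.takeWhile_cons, List.dropWhile_cons]
      rw [if_pos (by simp [h]), if_pos (by simp [h])]
      by_cases hn : pvRole w = some "noun"
      · simp only [goA, goS, if_pos h', if_pos hn]
        rw [ih]; simp
      · simp only [goA, goS, if_pos h', if_neg hn]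
        rw [ih]
    · have h' : ¬ (pvRole w = some "article" ∨ pvRole w = some "adjective" ∨ pvRole w = some "noun") := by
        simpa [pvIsPhraseWord] using h
      simp only [List.takeWhile_cons, List.dropWhile_cons]
      rw [if_neg (by simp [h]), if_neg (by simp [h])]
      simp only [goA, if_neg h', goS]
      by_cases hc : cur = [] <;> simp [hc]

def foldG (gs : List (Bool × List (List (String × String))))
    (acc : List (List (List (String × String)))) : List (List (List (String × String))) :=
  gs.foldl (fun acc g => if g.1 then acc ++ pvSplitRun g.2 else acc) acc

theorem foldG_acc (gs : List (Bool × List (List (String × String))))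
    (acc : List (List (List (String × String)))) :
    foldG gs acc = acc ++ foldG gs [] := by
  induction gs generalizing acc with
  | nil => simp [foldG]
  | cons g gs ih =>
    simp only [foldG, List.foldl_cons] at *
    rw [ih, ih (if g.1 then [] ++ pvSplitRun g.2 else [])]
    by_cases h : g.1 <;> simp [h, List.append_assoc]

theorem alt_eq_goA (words : List (List (String × String))) :
    group_noun_phrases_py_alt words = goA [] words := by
  generalize hn : words.length = n
  induction n using Nat.strong_induction_on generalizing words with
  | _ n ih =>
    match words, hn with
    | [], _ => simp [group_noun_phrases_py_alt, pvGroupBy, goA]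
    | w :: ws, hn =>
      have halt : group_noun_phrases_py_alt (w :: ws) =
          foldG (pvGroupBy pvIsPhraseWord (w :: ws)) [] := rfl
      have hlen : (ws.dropWhile (fun y => pvIsPhraseWord y == pvIsPhraseWord w)).length < n := by
        subst hn
        exact Nat.lt_succ_of_le (List.length_dropWhile_le _ _)
      have ihrec := ih _ hlen (ws.dropWhile (fun y => pvIsPhraseWord y == pvIsPhraseWord w)) rfl
      have hrec : foldG (pvGroupBy pvIsPhraseWord (ws.dropWhile (fun y => pvIsPhraseWord y == pvIsPhraseWord w))) [] =
          goA [] (ws.dropWhile (fun y => pvIsPhraseWord y == pvIsPhraseWord w)) := ihrec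
      rw [halt, pvGroupBy]
      simp only [foldG, List.foldl_cons]
      rw [show ∀ a, List.foldl (fun acc g => if g.1 = true then acc ++ pvSplitRun g.2 else acc)
            a (pvGroupBy pvIsPhraseWord (ws.dropWhile (fun y => pvIsPhraseWord y == pvIsPhraseWord w))) =
            foldG (pvGroupBy pvIsPhraseWord (ws.dropWhile (fun y => pvIsPhraseWord y == pvIsPhraseWord w))) a
          from fun _ => rfl]
      rw [foldG_acc, hrec]
      by_cases h : pvIsPhraseWord w
      · rw [if_pos (by simpa using h), List.nil_append, pvSplitRun_eq_goS]
        have h' : pvRole w = some "article" ∨ pvRole w = some "adjective" ∨ pvRole w = some "noun" := by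
          simpa [pvIsPhraseWord] using h
        have hkey : (fun y => pvIsPhraseWord y == pvIsPhraseWord w) = (fun y => pvIsPhraseWord y == true) := by
          funext y; rw [h]
        rw [hkey]
        have hsplit := goA_takeWhile (w :: ws) []
        rw [List.takeWhile_cons, List.dropWhile_cons] at hsplit
        rw [if_pos (by simp [h]), if_pos (by simp [h])] at hsplit
        exact hsplit.symm
      · have hb : pvIsPhraseWord w = false := by simpa using h
        rw [if_neg (by simp [hb]), List.nil_append]
        have hkey : (fun y => pvIsPhraseWord y == pvIsPhraseWord w) = (fun y => pvIsPhraseWord y == false) := by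
          funext y; rw [hb]
        rw [hkey]
        have hdrop := goA_dropWhile_not (w :: ws)
        rw [List.dropWhile_cons] at hdrop
        rw [if_pos (by simp [hb])] at hdrop
        exact hdrop.symm

-- ===== VERDICT (by name: the statement is the Claim_ definition above) =====
theorem group_noun_phrases_py_spec : Claim_equal_group_noun_phrases_py := by
  intro words _
  unfold Spec_group_noun_phrases_py
  rw [group_noun_phrases_py_eq_goA, alt_eq_goA]
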